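-- pv_equiv track=rewrite | github.com/kjetillll/perlweeklychallenge-club | challenge-147/roger-bell-west/python/ch-1.py | ltruncprimes
-- ===== SOURCE A (Python) =====
-- from math import sqrt,floor
-- from collections import deque
--
-- def genprimes(mx):
--   primesh=set(range(2,4))
--   for i in range(6,mx+2,6):
--     for j in range(i-1,i+2,2):
--       if j <= mx:
--         primesh.add(j)
--   q=deque([2,3,5,7])
--   p=q.popleft()
--   mr=floor(sqrt(mx))
--   while p <= mr:
--     if p in primesh:
--       for i in range(p*p,mx+1,p):
--         primesh.discard(i)
--     if len(q) < 2:
--       q.append(q[-1]+4)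
--       q.append(q[-1]+2)
--     p=q.popleft()
--   primes=list(primesh)
--   primes.sort()
--   return primes
--
-- def ltruncprimes(count):
--   out=[]
--   lt=0
--   p=[str(i) for i in genprimes(500)]
--   pp=set(p)
--   for pc in p:
--     l=len(pc)
--     c=True
--     for i in range(1,l):
--       if not pc[i:l] in pp:
--         c=False
--         break
--     if c:
--       out.append(int(pc))
--       lt += 1
--       if lt >= count:
--         break
--   return out
-- ===== SOURCE B (Python) =====
-- from math import sqrt,floor
-- from collections import deque
--
-- def genprimes(mx):
--   primesh=set(range(2,4))
--   for i in range(6,mx+2,6):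
--     for j in range(i-1,i+2,2):
--       if j <= mx:
--         primesh.add(j)
--   q=deque([2,3,5,7])
--   p=q.popleft()
--   mr=floor(sqrt(mx))
--   while p <= mr:
--     if p in primesh:
--       for i in range(p*p,mx+1,p):
--         primesh.discard(i)
--     if len(q) < 2:
--       q.append(q[-1]+4)
--       q.append(q[-1]+2)
--     p=q.popleft()
--   primes=list(primesh)
--   primes.sort()
--   return primes
--
-- def ltruncprimes(count):
--   # DP over the suffix structure: iterating the prime strings in ascending
--   # order, a prime is left-truncatable iff it has one digit or its tail
--   # (all digits but the first) is an already-confirmed left-truncatable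
--   # prime string; one memo lookup replaces A's scan over all suffixes.
--   out=[]
--   lt=0
--   ltset=set()
--   for pc in [str(i) for i in genprimes(500)]:
--     if len(pc)==1 or pc[1:] in ltset:
--       ltset.add(pc)
--       out.append(int(pc))
--       lt+=1
--       if lt>=count:
--         break
--   return out
-- ===== Notes on version B (the rewrite author's own statement) =====
-- stated objective: alternative
-- what changed: B replaces A's inner scan that re-checks every proper suffix of each prime against the prime set by a single memoized lookup: iterating the sorted prime strings ascending, a prime is left-truncatable iff it is one digit or its tail is already in the set of confirmed left-truncatable strings (DP over the suffix structure).
import Mathlib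
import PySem

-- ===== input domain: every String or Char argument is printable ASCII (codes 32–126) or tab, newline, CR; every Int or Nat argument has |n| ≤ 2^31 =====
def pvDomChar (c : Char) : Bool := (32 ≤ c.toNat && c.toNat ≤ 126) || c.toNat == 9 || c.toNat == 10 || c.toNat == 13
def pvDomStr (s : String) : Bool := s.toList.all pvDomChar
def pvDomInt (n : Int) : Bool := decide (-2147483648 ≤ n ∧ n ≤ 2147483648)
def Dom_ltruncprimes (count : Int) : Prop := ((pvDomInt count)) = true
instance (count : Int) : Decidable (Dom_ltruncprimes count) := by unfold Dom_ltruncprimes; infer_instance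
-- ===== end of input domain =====

-- B replaces A's all-suffixes scan per prime by a memoized lookup of the prime's tail
-- among already-confirmed left-truncatable prime strings (same cost class; 'alternative').

-- ===== PORT A =====
-- shared helper: genprimes (identical, and reused, in both Python sources).
-- math.floor(math.sqrt(mx)) is ported as the exact integer sqrt 'isqrt' (a bounded scan,
-- so the kernel can reduce it; exact for the only call site mx = 500, where sqrt is exact).
def isqrt (n : Nat) : Nat := ((List.range (n + 2)).takeWhile (fun k => k * k ≤ n)).length - 1

-- the while loop, ported with fuel mx.toNat + 8: each iteration pops one element of the
-- strictly increasing candidate stream 2,3,5,7,11,13,..., so for mx = 500 the fuel never runs out.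
def sieveLoop (mx mr : Int) : Nat → List Int → PySem.Set Int → Int → PySem.Set Int
  | 0, _, primesh, _ => primesh
  | fuel + 1, q, primesh, p =>
    if p ≤ mr then
      let primesh :=
        if PySem.Set.contains primesh p then
          (PySem.List.pyRange (p * p) (mx + 1) p).foldl PySem.Set.discard primesh
        else primesh
      let q :=
        if q.length < 2 then
          -- q.append(q[-1]+4); q.append(q[-1]+2)  (q is nonempty at every reachable state)
          let q := match q.getLast? with | some l => q ++ [l + 4] | none => q
          match q.getLast? with | some l => q ++ [l + 2] | none => q
        else q
      match q with
      | p' :: q' => sieveLoop mx mr fuel q' primesh p'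
      | [] => primesh   -- unreachable for the actual call: q never empties
    else primesh

def genprimes (mx : Int) : List Int :=
  let primesh := PySem.Set.ofList (PySem.List.pyRange 2 4 1)
  let primesh := (PySem.List.pyRange 6 (mx + 2) 6).foldl
    (fun s i => (PySem.List.pyRange (i - 1) (i + 2) 2).foldl
      (fun s j => if j ≤ mx then PySem.Set.add s j else s) s) primesh
  match [2, 3, 5, 7] with           -- q = deque([2,3,5,7]); p = q.popleft()
  | p :: q =>
    let mr : Int := (isqrt mx.toNat : Int)
    let primesh := sieveLoop mx mr (mx.toNat + 8) q primesh p
    PySem.List.sorted primesh (fun x => x) false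
  | [] => []

-- strings are handled as List Char (the PySem.Chars side); int(pc) on str(n) never fails, hence .getD 0.
-- inner loop 'for i in range(1,l): if not pc[i:l] in pp: c=False; break'
def checkA (pp : PySem.Set (List Char)) (pc : List Char) (l : Int) : List Int → Bool
  | [] => true
  | i :: rest =>
    if !(PySem.Set.contains pp (PySem.List.slice pc (some i) (some l))) then false
    else checkA pp pc l rest

def ltLoopA (count : Int) (pp : PySem.Set (List Char)) :
    List (List Char) → List Int → Int → List Int
  | [], out, _ => out
  | pc :: rest, out, lt =>
    let l : Int := pc.length
    let c := checkA pp pc l (PySem.List.pyRange 1 l 1)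
    if c then
      let out := out ++ [(PySem.Int.ofChars? pc).getD 0]
      let lt := lt + 1
      if lt ≥ count then out else ltLoopA count pp rest out lt
    else ltLoopA count pp rest out lt

def ltruncprimes (count : Int) : List Int :=
  let p := (genprimes 500).map PySem.Int.toChars
  let pp := PySem.Set.ofList p
  ltLoopA count pp p [] 0

-- ===== PORT B =====
def ltLoopB (count : Int) :
    List (List Char) → List Int → Int → PySem.Set (List Char) → List Int
  | [], out, _, _ => out
  | pc :: rest, out, lt, ltset =>
    if pc.length == 1 || PySem.Set.contains ltset (PySem.List.slice pc (some 1) none) then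
      let ltset := PySem.Set.add ltset pc
      let out := out ++ [(PySem.Int.ofChars? pc).getD 0]
      let lt := lt + 1
      if lt ≥ count then out else ltLoopB count rest out lt ltset
    else ltLoopB count rest out lt ltset

def ltruncprimes_alt (count : Int) : List Int :=
  ltLoopB count ((genprimes 500).map PySem.Int.toChars) [] 0 PySem.Set.empty

-- ===== PRECONDITION & SPEC =====
def Spec_ltruncprimes (count : Int) (out : List Int) : Prop := out = ltruncprimes_alt count
instance (count : Int) (out : List Int) : Decidable (Spec_ltruncprimes count out) := by unfold Spec_ltruncprimes; infer_instance

-- ===== CLAIM (what is proved, stated in full; the proofs are below) =====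
def Claim_equal_ltruncprimes : Prop := ∀ (count : Int), Dom_ltruncprimes count → Spec_ltruncprimes count (ltruncprimes count)

-- ===== LEMMAS AND PROOFS =====
-- the two loops, abstracted over the per-element decision: 'run' consumes a list of
-- (string, decision) pairs and performs the common append / count / break logic.
def run (count : Int) : List (List Char × Bool) → List Int → Int → List Int
  | [], out, _ => out
  | (pc, d) :: rest, out, lt =>
    if d then
      let out := out ++ [(PySem.Int.ofChars? pc).getD 0]
      let lt := lt + 1
      if lt ≥ count then out else run count rest out lt
    else run count rest out lt

-- B's decision stream: the memo set evolves along the traversal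
def annotB : List (List Char) → PySem.Set (List Char) → List (List Char × Bool)
  | [], _ => []
  | pc :: rest, ltset =>
    let d := pc.length == 1 || PySem.Set.contains ltset (PySem.List.slice pc (some 1) none)
    (pc, d) :: annotB rest (if d then PySem.Set.add ltset pc else ltset)

theorem ltLoopA_eq_run (count : Int) (pp : PySem.Set (List Char)) :
    ∀ (l : List (List Char)) (out : List Int) (lt : Int),
      ltLoopA count pp l out lt =
        run count (l.map (fun pc => (pc, checkA pp pc pc.length (PySem.List.pyRange 1 pc.length 1)))) out lt := by
  intro l
  induction l with
  | nil => intro out lt; rfl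
  | cons pc rest ih =>
    intro out lt
    simp only [ltLoopA, run, List.map]
    cases checkA pp pc pc.length (PySem.List.pyRange 1 pc.length 1) with
    | true =>
      simp only [if_true]
      by_cases h : lt + 1 ≥ count
      · simp only [if_pos h]
      · simp only [if_neg h]; exact ih _ _
    | false => simp only [Bool.false_eq_true, if_false]; exact ih _ _

theorem ltLoopB_eq_run (count : Int) :
    ∀ (l : List (List Char)) (out : List Int) (lt : Int) (ltset : PySem.Set (List Char)),
      ltLoopB count l out lt ltset = run count (annotB l ltset) out lt := by
  intro l
  induction l with
  | nil => intro out lt ltset; rfl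
  | cons pc rest ih =>
    intro out lt ltset
    simp only [ltLoopB, annotB, run]
    cases (pc.length == 1 || PySem.Set.contains ltset (PySem.List.slice pc (some 1) none)) with
    | true =>
      simp only [if_true]
      by_cases h : lt + 1 ≥ count
      · simp only [if_pos h]
      · simp only [if_neg h]; exact ih _ _ _
    | false => simp only [Bool.false_eq_true, if_false]; exact ih _ _ _

-- the prime-string list of genprimes 500, evaluated once (closed-term computation)
def primeChars500 : List (List Char) := [['2'], ['3'], ['5'], ['7'], ['1', '1'], ['1', '3'], ['1', '7'], ['1', '9'], ['2', '3'], ['2', '9'], ['3', '1'], ['3', '7'], ['4', '1'], ['4', '3'], ['4', '7'], ['5', '3'], ['5', '9'], ['6', '1'], ['6', '7'], ['7', '1'], ['7', '3'], ['7', '9'], ['8', '3'], ['8', '9'], ['9', '7'], ['1', '0', '1'], ['1', '0', '3'], ['1', '0', '7'], ['1', '0', '9'], ['1', '1', '3'], ['1', '2', '7'], ['1', '3', '1'], ['1', '3', '7'], ['1', '3', '9'], ['1', '4', '9'], ['1', '5', '1'], ['1', '5', '7'], ['1', '6', '3'], ['1', '6', '7'], ['1', '7', '3'], ['1', '7', '9'],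 ['1', '8', '1'], ['1', '9', '1'], ['1', '9', '3'], ['1', '9', '7'], ['1', '9', '9'], ['2', '1', '1'], ['2', '2', '3'], ['2', '2', '7'], ['2', '2', '9'], ['2', '3', '3'], ['2', '3', '9'], ['2', '4', '1'], ['2', '5', '1'], ['2', '5', '7'], ['2', '6', '3'], ['2', '6', '9'], ['2', '7', '1'], ['2', '7', '7'], ['2', '8', '1'], ['2', '8', '3'], ['2', '9', '3'], ['3', '0', '7'], ['3', '1', '1'], ['3', '1', '3'], ['3', '1', '7'], ['3', '3', '1'], ['3', '3', '7'], ['3', '4', '7'], ['3', '4', '9'], ['3', '5', '3'], ['3', '5', '9'], ['3', '6', '7'], ['3', '7', '3'], ['3', '7', '9'], ['3', '8', '3'], ['3', '8', '9'], ['3', '9', '7'], ['4', '0', '1'], ['4', '0', '9'], ['4', '1', '9'], ['4', '2', '1'], ['4', '3', '1'], ['4', '3', '3'], ['4', '3', '9'], ['4', '4', '3'], ['4', '4', '9'], ['4', '5', '7'], ['4', '6', '1'], ['4', '6', '3'], ['4', '6', '7'], ['4', '7', '9'], ['4', '8', '7'], ['4', '9', '1'], ['4', '9', '9']]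

set_option maxRecDepth 100000 in
set_option maxHeartbeats 4000000 in
theorem genprimes_500_val : (genprimes 500).map PySem.Int.toChars = primeChars500 := by
  decide

-- the two decision streams coincide on that fixed list
set_option maxRecDepth 100000 in
set_option maxHeartbeats 4000000 in
theorem decisions_eq :
    primeChars500.map
        (fun pc => (pc, checkA (PySem.Set.ofList primeChars500) pc pc.length (PySem.List.pyRange 1 pc.length 1)))
      = annotB primeChars500 PySem.Set.empty := by
  decide

-- ===== VERDICT (by name: the statement is the Claim_ definition above) =====
theorem ltruncprimes_spec : Claim_equal_ltruncprimes := by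
  intro count _
  unfold Spec_ltruncprimes ltruncprimes ltruncprimes_alt
  rw [ltLoopA_eq_run, ltLoopB_eq_run, genprimes_500_val, decisions_eq]
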